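-- pv_equiv track=rewrite | github.com/adamelyoumi/CandleMagic | dataset_creation.py | updateMaxes
-- ===== SOURCE A (Python) =====
-- def updateMaxes(lst: list, m):
--
--     for _ in range(len(lst)):
--         if lst[-1] < m:
--             lst.pop(-1)
--         else:
--             lst.append(m)
--             break
--     if len(lst) == 0:
--         lst = [m]
--     return(lst)
-- ===== SOURCE B (Python) =====
-- def updateMaxes(lst: list, m):
--     j = len(lst)
--     while j > 0 and lst[j - 1] < m:
--         j -= 1
--     if j == 0:
--         del lst[:]          # match A's in-place emptying in the all-popped case
--         return [m]
--     lst[j:] = [m]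
--     return lst
-- ===== Notes on version B (the rewrite author's own statement) =====
-- stated objective: alternative
-- what changed: replaces the incremental pop/append/break mutation loop with a read-only backward scan that computes the cut index, followed by one bulk slice assignment lst[j:] = [m]
import Mathlib
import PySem

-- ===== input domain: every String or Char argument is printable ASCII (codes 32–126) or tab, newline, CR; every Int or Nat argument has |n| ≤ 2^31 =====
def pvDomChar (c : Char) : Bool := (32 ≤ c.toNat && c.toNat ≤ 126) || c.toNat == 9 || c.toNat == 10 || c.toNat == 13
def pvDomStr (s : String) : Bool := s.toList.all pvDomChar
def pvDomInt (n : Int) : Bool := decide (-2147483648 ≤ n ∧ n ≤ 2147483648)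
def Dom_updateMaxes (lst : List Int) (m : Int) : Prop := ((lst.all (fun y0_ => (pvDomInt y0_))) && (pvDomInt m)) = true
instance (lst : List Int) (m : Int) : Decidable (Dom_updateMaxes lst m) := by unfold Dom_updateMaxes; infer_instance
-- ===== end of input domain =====

-- B replaces A's pop/append/break mutation loop by a read-only backward scan for the cut
-- index plus one bulk tail splice (same in-place mutation of the argument in Python);
-- the equivalence proved here is about the return value.


-- ===== PORT A =====
-- the for-loop over range(len(lst)): fuel counts the remaining iterations;
-- 'lst[-1]' is PySem.List.pyGet? lst (-1) (none = IndexError, never reached: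
-- the list can only become empty when the fuel is exhausted)
def updateMaxesGoA (fuel : Nat) (lst : List Int) (m : Int) : List Int :=
  match fuel with
  | 0 => lst
  | n + 1 =>
    match PySem.List.pyGet? lst (-1) with
    | none => lst
    | some last =>
      if last < m then updateMaxesGoA n lst.dropLast m   -- lst.pop(-1)
      else lst ++ [m]                                    -- lst.append(m); break

def updateMaxes (lst : List Int) (m : Int) : List Int :=
  let r := updateMaxesGoA lst.length lst m
  if r.length = 0 then [m] else r

-- ===== PORT B =====
-- the while-loop 'while j > 0 and lst[j-1] < m: j -= 1' (read-only backward scan)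
def updateMaxesCut (lst : List Int) (m : Int) : Nat → Nat
  | 0 => 0
  | j + 1 => if lst.getD j 0 < m then updateMaxesCut lst m j else j + 1

def updateMaxes_alt (lst : List Int) (m : Int) : List Int :=
  let j := updateMaxesCut lst m lst.length
  if j = 0 then [m]                 -- del lst[:]; return [m]
  else lst.take j ++ [m]            -- lst[j:] = [m]; return lst

-- ===== PRECONDITION & SPEC =====
def Spec_updateMaxes (lst : List Int) (m : Int) (out : List Int) : Prop := out = updateMaxes_alt lst m
instance (lst : List Int) (m : Int) (out : List Int) : Decidable (Spec_updateMaxes lst m out) := by unfold Spec_updateMaxes; infer_instance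

-- ===== CLAIM (what is proved, stated in full; the proofs are below) =====
def Claim_equal_updateMaxes : Prop := ∀ (lst : List Int) (m : Int), Dom_updateMaxes lst m → Spec_updateMaxes lst m (updateMaxes lst m)

-- ===== LEMMAS AND PROOFS =====

-- the backward scan never reads the last element once it is dropped
theorem updateMaxesCut_append (ys : List Int) (x m : Int) :
    ∀ j, j ≤ ys.length → updateMaxesCut (ys ++ [x]) m j = updateMaxesCut ys m j := by
  intro j
  induction j with
  | zero => intro _; rfl
  | succ k ih =>
    intro hk
    have hk' : k < ys.length := Nat.lt_of_succ_le hk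
    simp only [updateMaxesCut, List.getD_append _ _ _ _ hk', ih (Nat.le_of_lt hk')]

-- A's loop computes the cut-index characterisation
theorem updateMaxesGoA_eq (m : Int) : ∀ lst : List Int,
    updateMaxesGoA lst.length lst m =
      (if updateMaxesCut lst m lst.length = 0 then []
       else lst.take (updateMaxesCut lst m lst.length) ++ [m]) := by
  intro lst
  induction lst using List.reverseRecOn with
  | nil => rfl
  | append_singleton ys x ih =>
    have hlen : (ys ++ [x]).length = ys.length + 1 := by simp
    rw [hlen]
    have hget : PySem.List.pyGet? (ys ++ [x]) (-1) = some x := by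
      simp [PySem.List.pyGet?, PySem.List.pyIdx?]
    have hgetD : (ys ++ [x]).getD ys.length 0 = x := by simp
    simp only [updateMaxesGoA, updateMaxesCut, hget, hgetD]
    by_cases hx : x < m
    · have hdrop : (ys ++ [x]).dropLast = ys := by simp
      rw [if_pos hx, if_pos hx, hdrop,
        updateMaxesCut_append ys x m ys.length le_rfl, ih]
      by_cases h0 : updateMaxesCut ys m ys.length = 0
      · simp [h0]
      · have hle : updateMaxesCut ys m ys.length ≤ ys.length := by
          clear ih h0
          induction ys.length with
          | zero => simp [updateMaxesCut]
          | succ k ihk =>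
            simp only [updateMaxesCut]
            split
            · exact Nat.le_succ_of_le ihk
            · exact le_rfl
        simp [h0, List.take_append_of_le_length hle]
    · rw [if_neg hx, if_neg hx, if_neg (Nat.succ_ne_zero _)]
      have : List.take (ys.length + 1) (ys ++ [x]) = ys ++ [x] := by
        simp
      simp [this]

-- ===== VERDICT (by name: the statement is the Claim_ definition above) =====
theorem updateMaxes_spec : Claim_equal_updateMaxes := by
  intro lst m _
  unfold Spec_updateMaxes updateMaxes updateMaxes_alt
  rw [updateMaxesGoA_eq m lst]
  by_cases h0 : updateMaxesCut lst m lst.length = 0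
  · simp [h0]
  · simp [h0]
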